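-- pv_equiv track=rewrite | github.com/PeopleAndService/AlgorithmStudy | jaeseuk/pypython/Programmers/level1/recommend_a_job.py | solution
-- ===== SOURCE A (Python) =====
-- def solution(table, languages, preference):
--     table = [job.split() for job in table]
--     answer = [0, ""]
--
--     for job in table:
--         score = 0
--         for i in range(len(languages)):
--             if languages[i] in job:
--                 score += (6 - job.index(languages[i])) * preference[i]
--
--         answer = min(answer, [score, job[0]], key=lambda x: (-x[0], x[1]))
--
--     return answer[1]
-- ===== SOURCE B (Python) =====
-- def solution(table, languages, preference):
--     # One pass: weight per language summed into a dict, then a single scan of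
--     # each job's tokens (no inner languages loop, no job.index scans).
--     pref = {}
--     for lang, w in zip(languages, preference):
--         pref[lang] = pref.get(lang, 0) + w
--
--     best_score, best_name = 0, ""
--     for job in table:
--         tokens = job.split()
--         score = 0
--         seen = set()
--         for pos, tok in enumerate(tokens):
--             if tok not in seen:
--                 seen.add(tok)
--                 score += (6 - pos) * pref.get(tok, 0)
--         if score > best_score or (score == best_score and tokens[0] < best_name):
--             best_score, best_name = score, tokens[0]
--     return best_name
-- ===== Notes on version B (the rewrite author's own statement) =====
-- stated objective: faster
-- what changed: B precomputes a dict of summed preference weights per language and scores each job in a single pass over its tokens with a seen-set (no per-language membership scan and no job.index rescans), tracking the best (score, name) explicitly instead of min-with-key.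
import Mathlib
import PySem

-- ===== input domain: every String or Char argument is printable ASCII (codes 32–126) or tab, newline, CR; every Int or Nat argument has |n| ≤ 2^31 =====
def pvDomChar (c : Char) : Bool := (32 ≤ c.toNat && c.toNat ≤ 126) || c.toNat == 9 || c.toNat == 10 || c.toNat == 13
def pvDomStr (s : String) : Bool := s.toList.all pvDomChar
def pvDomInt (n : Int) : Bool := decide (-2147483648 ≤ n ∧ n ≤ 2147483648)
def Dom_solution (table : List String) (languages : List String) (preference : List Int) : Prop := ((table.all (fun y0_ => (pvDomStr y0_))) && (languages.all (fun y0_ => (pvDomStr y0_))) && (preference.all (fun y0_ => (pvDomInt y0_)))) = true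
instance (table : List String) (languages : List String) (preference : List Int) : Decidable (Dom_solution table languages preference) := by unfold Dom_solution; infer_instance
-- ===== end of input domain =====

-- B precomputes a dict of summed weights per language and scores each job in one pass over
-- its tokens (instead of a per-language membership scan with job.index rescans); proved equal
-- to A on every input of Pre_ (A's crash inputs excluded).

-- ===== PORT A =====
-- min(a, b, key=lambda x: (-x[0], x[1])) : returns b exactly when key(b) < key(a)
def pyMinKey (a b : Int × String) : Int × String :=
  if -b.1 < -a.1 ∨ (-b.1 = -a.1 ∧ b.2 < a.2) then b else a

def solution (table : List String) (languages : List String) (preference : List Int) : String :=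
  let tbl := table.map (fun job => PySem.Str.split₀ job)
  let answer := tbl.foldl (fun (ans : Int × String) (job : List String) =>
      let score := (List.range languages.length).foldl (fun (s : Int) (i : Nat) =>
          if languages.getD i "" ∈ job then
            s + ((6 : Int) - ((PySem.List.index? job (languages.getD i "")).getD 0 : Nat)) * preference.getD i 0
          else s) 0
      pyMinKey ans (score, job.getD 0 "")) ((0 : Int), "")
  answer.2

-- ===== PORT B =====
def solution_alt (table : List String) (languages : List String) (preference : List Int) : String :=
  let pref := (languages.zip preference).foldl
      (fun (d : PySem.Dict String Int) lw => d.insert lw.1 (d.getD lw.1 0 + lw.2)) PySem.Dict.empty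
  let best := table.foldl (fun (b : Int × String) (job : String) =>
      let tokens := PySem.Str.split₀ job
      let ss := (PySem.List.enumerate tokens 0).foldl
          (fun (ss : Int × PySem.Set String) (pt : Int × String) =>
            if pt.2 ∈ ss.2 then ss
            else (ss.1 + ((6 : Int) - pt.1) * pref.getD pt.2 0, PySem.Set.add ss.2 pt.2))
          ((0 : Int), PySem.Set.empty)
      if ss.1 > b.1 ∨ (ss.1 = b.1 ∧ tokens.getD 0 "" < b.2) then (ss.1, tokens.getD 0 "") else b)
    ((0 : Int), "")
  best.2

-- ===== PRECONDITION & SPEC =====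
-- Pre_ excludes exactly the inputs where A raises an IndexError: a language with no matching
-- preference weight (index ≥ len(preference)) occurring in some job (preference[i] raises),
-- and a job string with no tokens (job[0] raises).
def Pre_solution (table : List String) (languages : List String) (preference : List Int) : Prop :=
  (∀ i ∈ List.range languages.length, preference.length ≤ i →
      ∀ s ∈ table, languages.getD i "" ∉ PySem.Str.split₀ s) ∧
    ∀ s ∈ table, PySem.Str.split₀ s ≠ []
instance (table : List String) (languages : List String) (preference : List Int) : Decidable (Pre_solution table languages preference) := by unfold Pre_solution; infer_instance

def pvWitness_solution : List String × List String × List Int :=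
  (["java backend junior pizza 151", "python frontend senior chicken 100", "cpp senior pizza 140"],
   ["python", "cpp", "java"], [7, 5, 5])

def Spec_solution (table : List String) (languages : List String) (preference : List Int) (out : String) : Prop := out = solution_alt table languages preference
instance (table : List String) (languages : List String) (preference : List Int) (out : String) : Decidable (Spec_solution table languages preference out) := by unfold Spec_solution; infer_instance

-- ===== CLAIM (what is proved, stated in full; the proofs are below) =====
def Claim_equal_solution : Prop := ∀ (table : List String) (languages : List String) (preference : List Int), Dom_solution table languages preference → Pre_solution table languages preference → Spec_solution table languages preference (solution table languages preference)

-- ===== LEMMAS AND PROOFS =====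

-- the common per-job reference score: one summand per (language, weight) pair
def pvS (pairs : List (String × Int)) (toks : List String) : Int :=
  (pairs.map (fun lw => if lw.1 ∈ toks then ((6 : Int) - (toks.idxOf lw.1 : Int)) * lw.2 else 0)).sum

-- B's per-job scoring loop, structurally (positions advance, unseen tokens contribute)
def pvBsum (d : PySem.Dict String Int) : List String → PySem.Set String → Int → Int
  | [], _, _ => 0
  | t :: rest, seen, p =>
      if t ∈ seen then pvBsum d rest seen (p + 1)
      else ((6 : Int) - p) * d.getD t 0 + pvBsum d rest (PySem.Set.add seen t) (p + 1)

lemma pv_index_getD {toks : List String} {v : String} (h : v ∈ toks) :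
    ((PySem.List.index? toks v).getD 0 : Int) = (toks.idxOf v : Int) := by
  induction toks with
  | nil => cases h
  | cons t rest ih =>
    by_cases ht : t = v
    · subst ht
      rw [PySem.List.index?_cons_self, List.idxOf_cons_self]
      simp
    · rw [PySem.List.index?_cons_of_ne rest ht]
      have h2 : v ∈ rest := by
        rcases List.mem_cons.mp h with h1 | h2
        · exact absurd h1.symm ht
        · exact h2
      obtain ⟨k, hk⟩ := Option.isSome_iff_exists.mp ((PySem.List.index?_isSome_iff rest v).mpr h2)
      rw [hk] at ih ⊢
      simp only [Option.map_some, Option.getD_some] at ih ⊢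
      rw [List.idxOf_cons_ne rest ht]
      have := ih h2
      push_cast at this ⊢
      omega

lemma pv_map_range_getD_zip {α β γ : Type} (F : α → β → γ) (dx : α) (dy : β) :
    ∀ (xs : List α) (ys : List β),
      (List.range (min xs.length ys.length)).map (fun i => F (xs.getD i dx) (ys.getD i dy))
        = (xs.zip ys).map (fun p => F p.1 p.2) := by
  intro xs
  induction xs with
  | nil => intro ys; simp
  | cons x xs ih =>
    intro ys
    cases ys with
    | nil => simp
    | cons y ys =>
      simp only [List.length_cons, Nat.succ_min_succ, List.range_succ_eq_map, List.map_cons,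
        List.map_map, List.zip_cons_cons]
      refine congrArg₂ (· :: ·) rfl ?_
      have := ih ys
      simpa [Function.comp] using this

-- A's inner loop computes the reference score
lemma pv_scoreA_eq_S (languages : List String) (preference : List Int) (toks : List String)
    (h : ∀ i, preference.length ≤ i → i < languages.length → languages.getD i "" ∉ toks) :
    (List.range languages.length).foldl (fun (s : Int) (i : Nat) =>
        if languages.getD i "" ∈ toks then
          s + ((6 : Int) - ((PySem.List.index? toks (languages.getD i "")).getD 0 : Nat)) * preference.getD i 0
        else s) 0 = pvS (languages.zip preference) toks := by
  have hfun : (fun (s : Int) (i : Nat) =>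
        if languages.getD i "" ∈ toks then
          s + ((6 : Int) - ((PySem.List.index? toks (languages.getD i "")).getD 0 : Nat)) * preference.getD i 0
        else s)
      = fun (s : Int) (i : Nat) => s +
          (if languages.getD i "" ∈ toks then
            ((6 : Int) - ((PySem.List.index? toks (languages.getD i "")).getD 0 : Nat)) * preference.getD i 0
          else 0) := by
    funext s i; split <;> simp
  rw [hfun, PySem.List.foldl_add, zero_add]
  have hsplit : List.range languages.length
      = List.range (min languages.length preference.length)
        ++ (List.range (languages.length - min languages.length preference.length)).map
            (fun j => min languages.length preference.length + j) := by
    rw [← List.range_add]; congr 1; omega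
  rw [hsplit, List.map_append, List.sum_append]
  have htail : (List.map
      (fun i => if languages.getD i "" ∈ toks then
          ((6 : Int) - ((PySem.List.index? toks (languages.getD i "")).getD 0 : Nat)) * preference.getD i 0
        else 0)
      (List.map (fun j => min languages.length preference.length + j)
        (List.range (languages.length - min languages.length preference.length)))).sum = 0 := by
    apply List.sum_eq_zero
    intro z hz
    obtain ⟨i, hi, rfl⟩ := List.mem_map.mp hz
    obtain ⟨j, hj, rfl⟩ := List.mem_map.mp hi
    rw [List.mem_range] at hj
    have hnot : languages.getD (min languages.length preference.length + j) "" ∉ toks :=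
      h _ (by omega) (by omega)
    rw [if_neg hnot]
  rw [htail, add_zero]
  rw [pv_map_range_getD_zip (fun (l : String) (w : Int) =>
        if l ∈ toks then ((6 : Int) - ((PySem.List.index? toks l).getD 0 : Nat)) * w else 0)
      "" 0 languages preference]
  unfold pvS
  congr 1
  apply List.map_congr_left
  intro p _
  by_cases hp : p.1 ∈ toks
  · simp only [hp, if_true]
    rw [pv_index_getD hp]
  · simp [hp]

-- B's token loop computes pvBsum
lemma pv_foldB (d : PySem.Dict String Int) :
    ∀ (toks : List String) (seen : PySem.Set String) (p acc : Int),
      ((PySem.List.enumerate toks p).foldl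
          (fun (ss : Int × PySem.Set String) (pt : Int × String) =>
            if pt.2 ∈ ss.2 then ss
            else (ss.1 + ((6 : Int) - pt.1) * d.getD pt.2 0, PySem.Set.add ss.2 pt.2))
          (acc, seen)).1 = acc + pvBsum d toks seen p := by
  intro toks
  induction toks with
  | nil => intro seen p acc; simp [pvBsum, PySem.List.enumerate_nil]
  | cons t rest ih =>
    intro seen p acc
    rw [PySem.List.enumerate_cons, List.foldl_cons]
    by_cases hs : t ∈ seen
    · simp only [hs, if_true, pvBsum]
      exact ih seen (p + 1) acc
    · simp only [hs, if_false, pvBsum]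
      rw [ih (PySem.Set.add seen t) (p + 1) (acc + (6 - p) * d.getD t 0)]
      ring

-- adding one (language, weight) pair to the dict adds its pair contribution to pvBsum
lemma pv_bsum_insert (d : PySem.Dict String Int) (l : String) (w : Int) :
    ∀ (toks : List String) (seen : PySem.Set String) (p : Int),
      pvBsum (d.insert l (d.getD l 0 + w)) toks seen p
        = pvBsum d toks seen p
          + (if l ∈ toks ∧ l ∉ seen then ((6 : Int) - (p + (toks.idxOf l : Int))) * w else 0) := by
  intro toks
  induction toks with
  | nil => intro seen p; simp [pvBsum]
  | cons t rest ih =>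
    intro seen p
    by_cases hs : t ∈ seen
    · simp only [pvBsum, hs, if_true]
      rw [ih seen (p + 1)]
      by_cases hl : l = t
      · subst hl
        simp [hs]
      · have hmem : l ∈ t :: rest ↔ l ∈ rest := by
          simp [List.mem_cons, hl]
        by_cases hr : l ∈ rest ∧ l ∉ seen
        · simp only [hr, if_true, hmem.mpr hr.1, not_false_iff, and_self, if_true]
          rw [List.idxOf_cons_ne rest (fun hh => hl hh.symm)]
          push_cast
          ring
        · have h2 : ¬ (l ∈ t :: rest ∧ l ∉ seen) := by
            intro ⟨a, b⟩; exact hr ⟨hmem.mp a, b⟩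
          rw [if_neg hr, if_neg h2]
    · simp only [pvBsum, hs, if_false]
      by_cases hl : l = t
      · subst hl
        rw [PySem.Dict.getD_insert_self]
        rw [ih (PySem.Set.add seen l) (p + 1)]
        have hladd : l ∈ PySem.Set.add seen l := by
          simp [PySem.Set.mem_add]
        simp only [hladd, not_true, and_false, if_false, add_zero]
        have : l ∈ l :: rest := List.mem_cons_self
        simp only [this, hs, not_false_iff, and_self, if_true, List.idxOf_cons_self]
        push_cast
        ring
      · rw [PySem.Dict.getD_insert_of_ne d _ _ (fun hh => hl (Eq.symm hh))]
        rw [ih (PySem.Set.add seen t) (p + 1)]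
        have hmemadd : l ∈ PySem.Set.add seen t ↔ l ∈ seen := by
          simp [PySem.Set.mem_add, hl]
        have hmem : l ∈ t :: rest ↔ l ∈ rest := by simp [List.mem_cons, hl]
        by_cases hr : l ∈ rest ∧ l ∉ seen
        · simp only [hr.1, hr.2, hmemadd, not_false_iff, and_self, if_true, hmem.mpr hr.1]
          rw [List.idxOf_cons_ne rest (fun hh => hl hh.symm)]
          push_cast
          ring
        · have h1 : ¬ (l ∈ rest ∧ l ∉ PySem.Set.add seen t) := by
            intro ⟨a, b⟩; exact hr ⟨a, fun c => b (hmemadd.mpr c)⟩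
          have h2 : ¬ (l ∈ t :: rest ∧ l ∉ seen) := by
            intro ⟨a, b⟩; exact hr ⟨hmem.mp a, b⟩
          rw [if_neg h1, if_neg h2]
          have c1 : ¬ (l ∈ rest ∧ l ∉ seen ∧ ¬ l = t) := fun ⟨a, b, _⟩ => hr ⟨a, b⟩
          have c2 : ¬ ((l = t ∨ l ∈ rest) ∧ l ∉ seen) := fun ⟨a, b⟩ => hr ⟨a.resolve_left hl, b⟩
          simp only [List.mem_cons, hmemadd, hl, not_false_iff, and_true] at *
          ring

lemma pv_bsum_empty : ∀ (toks : List String) (seen : PySem.Set String) (p : Int),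
    pvBsum PySem.Dict.empty toks seen p = 0 := by
  intro toks
  induction toks with
  | nil => intro seen p; simp [pvBsum]
  | cons t rest ih =>
    intro seen p
    by_cases hs : t ∈ seen <;> simp [pvBsum, hs, ih, PySem.Dict.getD_empty]

-- the dict built from all pairs scores a job by the reference score
lemma pv_bsum_build (toks : List String) :
    ∀ (pairs : List (String × Int)) (d : PySem.Dict String Int),
      pvBsum (pairs.foldl (fun d lw => d.insert lw.1 (d.getD lw.1 0 + lw.2)) d) toks PySem.Set.empty 0
        = pvBsum d toks PySem.Set.empty 0 + pvS pairs toks := by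
  intro pairs
  induction pairs with
  | nil => intro d; simp [pvS]
  | cons lw rest ih =>
    intro d
    rw [List.foldl_cons, ih]
    rw [pv_bsum_insert d lw.1 lw.2 toks PySem.Set.empty 0]
    have : (lw.1 ∈ toks ∧ lw.1 ∉ (PySem.Set.empty : PySem.Set String)) ↔ lw.1 ∈ toks := by
      simp [PySem.Set.empty]
    unfold pvS
    simp only [List.map_cons, List.sum_cons, this]
    by_cases hm : lw.1 ∈ toks
    · simp only [hm, if_true]; ring
    · simp only [hm, if_false]; ring

-- ===== VERDICT (by name: the statement is the Claim_ definition above) =====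
theorem solution_spec : Claim_equal_solution := by
  intro table languages preference _ hpre
  obtain ⟨hlen, _⟩ := hpre
  unfold Spec_solution solution solution_alt
  dsimp only
  rw [List.foldl_map]
  refine congrArg Prod.snd ?_
  apply PySem.List.foldl_congr_mem
  intro ans job hjob
  have hnot : ∀ i, preference.length ≤ i → i < languages.length →
      languages.getD i "" ∉ PySem.Str.split₀ job := by
    intro i h1 h2
    exact hlen i (List.mem_range.mpr h2) h1 job hjob
  rw [pv_scoreA_eq_S languages preference (PySem.Str.split₀ job) hnot]
  rw [pv_foldB _ (PySem.Str.split₀ job) PySem.Set.empty 0 0, zero_add,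
    pv_bsum_build (PySem.Str.split₀ job) (languages.zip preference) PySem.Dict.empty,
    pv_bsum_empty, zero_add]
  unfold pyMinKey
  apply if_congr _ rfl rfl
  constructor
  · rintro (h | ⟨h1, h2⟩)
    · left; omega
    · right; exact ⟨by omega, h2⟩
  · rintro (h | ⟨h1, h2⟩)
    · left; omega
    · right; exact ⟨by omega, h2⟩
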